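-- pv_equiv track=rewrite | github.com/pypi-data/pypi-mirror-342 | packages/CNZ/cnz-0.1.0-py3-none-any.whl/CNZ/single_passmacro.py | identify_and_expand_macros
-- ===== SOURCE A (Python) =====
-- def identify_and_expand_macros(lines):
--     mnt = {}
--     mdt = []
--     ala = {}
--     expanded = []
--
--     i = 0
--     mdt_index = 0
--     while i < len(lines):
--         if lines[i].strip() == "MACRO":
--             macro_name = lines[i+1].split()[0]
--             params = lines[i+1].split()[1:]
--             param_names = [p.replace('&', '') for p in params]
--
--             ala[macro_name] = param_names
--             mnt[macro_name] = mdt_index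
--
--             i += 2
--             while lines[i].strip() != "MEND":
--                 line = lines[i]
--                 for j, p in enumerate(param_names):
--                     line = line.replace('&' + p, f"#ARG{j}")
--                 mdt.append(line)
--                 mdt_index += 1
--                 i += 1
--             mdt.append("MEND")
--             mdt_index += 1
--         else:
--             tokens = lines[i].split()
--             if tokens and tokens[0] in mnt:
--                 macro = tokens[0]
--                 args = tokens[1:]
--                 mapping = {f"#ARG{j}": args[j] for j in range(len(args))}
--                 idx = mnt[macro]
--                 while mdt[idx] != "MEND":
--                     temp = mdt[idx]
--                     for k, v in mapping.items():
--                         temp = temp.replace(k, v)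
--                     expanded.append(temp)
--                     idx += 1
--             else:
--                 expanded.append(lines[i])
--         i += 1
--     return expanded
-- ===== SOURCE B (Python) =====
-- def identify_and_expand_macros(lines):
--     # Deferred substitution: the parse stores each macro's RAW body slice and its
--     # parameter names untouched; both substitution stages run lazily per invocation.
--     macros = {}
--     out = []
--     i = 0
--     while i < len(lines):
--         line = lines[i]
--         if line.strip() == "MACRO":
--             name, *params = lines[i + 1].split()
--             j = i + 2
--             while lines[j].strip() != "MEND":
--                 j += 1
--             macros[name] = ([p.replace('&', '') for p in params], lines[i + 2:j])
--             i = j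
--         else:
--             tokens = line.split()
--             if tokens and tokens[0] in macros:
--                 params, body = macros[tokens[0]]
--                 mapping = {f"#ARG{k}": a for k, a in enumerate(tokens[1:])}
--                 for raw in body:
--                     t = raw
--                     for k, p in enumerate(params):
--                         t = t.replace('&' + p, f"#ARG{k}")
--                     for key, val in mapping.items():
--                         t = t.replace(key, val)
--                     out.append(t)
--             else:
--                 out.append(line)
--         i += 1
--     return out
-- ===== Notes on version B (the rewrite author's own statement) =====
-- stated objective: alternative
-- what changed: A eagerly rewrites every body line into a flat MDT with placeholders at definition time and expands by scanning from a stored index to a MEND sentinel; B parses by locating MEND and slicing the raw body, stores (parameter names, raw lines) per macro name, and performs both substitution stages lazily at each invocation.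
import Mathlib
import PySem

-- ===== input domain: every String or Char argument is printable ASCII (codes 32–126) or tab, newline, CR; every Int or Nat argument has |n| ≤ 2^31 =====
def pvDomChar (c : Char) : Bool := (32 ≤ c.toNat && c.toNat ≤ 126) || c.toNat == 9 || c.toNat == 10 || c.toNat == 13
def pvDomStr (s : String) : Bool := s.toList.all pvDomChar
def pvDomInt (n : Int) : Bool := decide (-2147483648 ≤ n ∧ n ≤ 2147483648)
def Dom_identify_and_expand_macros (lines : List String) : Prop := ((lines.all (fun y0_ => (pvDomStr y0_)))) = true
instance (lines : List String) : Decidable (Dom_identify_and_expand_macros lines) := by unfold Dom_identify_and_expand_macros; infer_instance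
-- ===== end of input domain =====

-- B replaces A's eager placeholder rewriting into a flat MDT (with a name->index table and
-- "MEND" sentinel scans) by a parse that slices the raw macro body and a per-invocation
-- deferred two-stage substitution; same results on every well-formed input.


-- ===== PORT A =====
-- line = line.replace('&'+p, f"#ARG{j}") for j, p in enumerate(param_names)
def pvA_subst (pnames : List String) (line : String) : String :=
  (PySem.List.enumerate pnames 0).foldl
    (fun l jp => PySem.Str.replace l ("&" ++ jp.2) ("#ARG" ++ PySem.Int.toStr jp.1)) line

-- inner "while lines[i].strip() != 'MEND'" parse loop: threads (mdt, mdt_index); none = IndexError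
def pvA_body (pnames : List String) : List String → List String → Int → Option (List String × Int × List String)
  | [], _, _ => none
  | l :: rest, mdt, k =>
    if PySem.Str.strip l = "MEND" then some (mdt, k, rest)
    else pvA_body pnames rest (mdt ++ [pvA_subst pnames l]) (k + 1)

-- "while mdt[idx] != 'MEND'" expansion scan over the MDT suffix; none = IndexError
def pvA_expand (mapping : PySem.Dict String String) : List String → Option (List String)
  | [] => none
  | t :: rest =>
    if t = "MEND" then some []
    else
      match pvA_expand mapping rest with
      | none => none
      | some out => some ((mapping.items.foldl (fun temp kv => PySem.Str.replace temp kv.1 kv.2) t) :: out)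

theorem pvA_body_rest_le (pnames : List String) :
    ∀ (rest mdt : List String) (k : Int) (m : List String) (kk : Int) (r : List String),
      pvA_body pnames rest mdt k = some (m, kk, r) → r.length ≤ rest.length := by
  intro rest
  induction rest with
  | nil => intro mdt k m kk r h; simp [pvA_body] at h
  | cons l t ih =>
    intro mdt k m kk r h
    simp only [pvA_body] at h
    split at h
    · simp only [Option.some.injEq, Prod.mk.injEq] at h
      simp [← h.2.2, List.length_cons]
    · have := ih _ _ _ _ _ h
      simp [List.length_cons]; omega

-- outer while loop of A; state = (mnt, mdt, mdt_index, ala, expanded); none = IndexError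
def pvA_loop : List String → PySem.Dict String Int → List String → Int →
    PySem.Dict String (List String) → List String → Option (List String)
  | [], _, _, _, _, expanded => some expanded
  | l :: rest, mnt, mdt, k, ala, expanded =>
    if PySem.Str.strip l = "MACRO" then
      match rest with
      | [] => none                                   -- lines[i+1]: IndexError
      | hdr :: rest2 =>
        match PySem.Str.split₀ hdr with
        | [] => none                                 -- split()[0]: IndexError
        | name :: params =>
          let pnames := params.map (fun p => PySem.Str.replace p "&" "")
          match h : pvA_body pnames rest2 mdt k with
          | none => none
          | some (mdt2, k2, rest') =>
            pvA_loop rest' (mnt.insert name k) (mdt2 ++ ["MEND"]) (k2 + 1)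
              (ala.insert name pnames) expanded
    else
      match PySem.Str.split₀ l with
      | [] => pvA_loop rest mnt mdt k ala (expanded ++ [l])
      | tok :: args =>
        if mnt.contains tok then
          let mapping := (PySem.List.pyRange 0 (args.length : Int) 1).foldl
            (fun d j => d.insert ("#ARG" ++ PySem.Int.toStr j) (PySem.List.pyGetD args j ""))
            PySem.Dict.empty
          match pvA_expand mapping (mdt.drop (mnt.getD tok 0).toNat) with
          | none => none
          | some outs => pvA_loop rest mnt mdt k ala (expanded ++ outs)
        else pvA_loop rest mnt mdt k ala (expanded ++ [l])
termination_by lines _ _ _ _ _ => lines.length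
decreasing_by
  all_goals simp only [List.length_cons]
  all_goals first
    | (have := pvA_body_rest_le _ _ _ _ _ _ _ h; omega)
    | omega

def identify_and_expand_macros (lines : List String) : List String :=
  (pvA_loop lines PySem.Dict.empty [] 0 PySem.Dict.empty []).getD []

-- ===== PORT B =====
-- "j = i+2; while lines[j].strip() != 'MEND': j += 1; body = lines[i+2:j]":
-- locate the MEND delimiter and return the raw slice before it plus the lines after it
def pvB_split : List String → Option (List String × List String)
  | [] => none                                       -- lines[j]: IndexError
  | l :: rest =>
    if PySem.Str.strip l = "MEND" then some ([], rest)
    else (pvB_split rest).map (fun p => (l :: p.1, p.2))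

-- one expanded line: both substitution stages (params -> #ARGk, then mapping) run here
def pvB_exp (pnames : List String) (mapping : PySem.Dict String String) (raw : String) : String :=
  mapping.items.foldl (fun t kv => PySem.Str.replace t kv.1 kv.2)
    ((PySem.List.enumerate pnames 0).foldl
      (fun t kp => PySem.Str.replace t ("&" ++ kp.2) ("#ARG" ++ PySem.Int.toStr kp.1)) raw)

theorem pvB_split_rest_le :
    ∀ (rest : List String) (b r : List String),
      pvB_split rest = some (b, r) → r.length ≤ rest.length := by
  intro rest
  induction rest with
  | nil => intro b r h; simp [pvB_split] at h
  | cons l t ih =>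
    intro b r h
    simp only [pvB_split] at h
    split at h
    · simp only [Option.some.injEq, Prod.mk.injEq] at h
      simp [← h.2, List.length_cons]
    · cases ht : pvB_split t with
      | none => rw [ht] at h; simp at h
      | some p =>
        rw [ht] at h
        simp only [Option.map_some, Option.some.injEq, Prod.mk.injEq] at h
        have := ih _ _ ht
        simp only [List.length_cons, ← h.2]
        omega

-- outer while loop of B; state = (macros : name -> (param names, raw body), out)
def pvB_loop : List String → PySem.Dict String (List String × List String) → List String → Option (List String)
  | [], _, out => some out
  | l :: rest, macros, out =>
    if PySem.Str.strip l = "MACRO" then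
      match rest with
      | [] => none
      | hdr :: rest2 =>
        match PySem.Str.split₀ hdr with
        | [] => none
        | name :: params =>
          match h : pvB_split rest2 with
          | none => none
          | some (body, rest') =>
            pvB_loop rest' (macros.insert name (params.map (fun p => PySem.Str.replace p "&" ""), body)) out
    else
      match PySem.Str.split₀ l with
      | [] => pvB_loop rest macros (out ++ [l])
      | tok :: args =>
        if macros.contains tok then
          let pb := macros.getD tok ([], [])
          let mapping := (PySem.List.enumerate args 0).foldl
            (fun d ja => d.insert ("#ARG" ++ PySem.Int.toStr ja.1) ja.2) PySem.Dict.empty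
          pvB_loop rest macros (out ++ pb.2.map (pvB_exp pb.1 mapping))
        else pvB_loop rest macros (out ++ [l])
termination_by lines _ _ => lines.length
decreasing_by
  all_goals simp only [List.length_cons]
  all_goals first
    | (have := pvB_split_rest_le _ _ _ h; omega)
    | omega

def identify_and_expand_macros_alt (lines : List String) : List String :=
  (pvB_loop lines PySem.Dict.empty []).getD []

-- ===== PRECONDITION & SPEC =====
-- A raises IndexError exactly when a line stripping to "MACRO" is the last line, when the line
-- after it has no tokens, or when no later line strips to "MEND". Pre_ is the closed-form shape
-- condition admitting every other input: a 3-state check (0 = top level, 1 = expecting a macro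
-- header with at least one token, 2 = inside a body awaiting "MEND") that must end at top level.
def pvShapeStep : Option Nat → String → Option Nat
  | none, _ => none
  | some 0, l => if PySem.Str.strip l = "MACRO" then some 1 else some 0
  | some 1, l => if (PySem.Str.split₀ l).isEmpty then none else some 2
  | some 2, l => if PySem.Str.strip l = "MEND" then some 0 else some 2
  | some _, _ => none

def Pre_identify_and_expand_macros (lines : List String) : Prop :=
  lines.foldl pvShapeStep (some 0) = some 0
instance (lines : List String) : Decidable (Pre_identify_and_expand_macros lines) := by
  unfold Pre_identify_and_expand_macros; infer_instance

def pvWitness_identify_and_expand_macros : List String :=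
  ["MACRO", "INCR &A", "ADD &A", "MEND", "INCR 7", "HALT"]

def Spec_identify_and_expand_macros (lines : List String) (out : List String) : Prop := out = identify_and_expand_macros_alt lines
instance (lines : List String) (out : List String) : Decidable (Spec_identify_and_expand_macros lines out) := by unfold Spec_identify_and_expand_macros; infer_instance

-- ===== CLAIM (what is proved, stated in full; the proofs are below) =====
def Claim_equal_identify_and_expand_macros : Prop := ∀ (lines : List String), Dom_identify_and_expand_macros lines → Pre_identify_and_expand_macros lines → Spec_identify_and_expand_macros lines (identify_and_expand_macros lines)

-- ===== LEMMAS AND PROOFS =====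

-- membership in the accumulator survives PySem.Chars.replace.go
theorem pv_go_mem_acc (old new : List Char) :
    ∀ (fuel : Nat) (l acc : List Char) (c : Char), c ∈ acc →
      c ∈ PySem.Chars.replace.go old new fuel l acc := by
  intro fuel
  induction fuel with
  | zero => intro l acc c hc; simp [PySem.Chars.replace.go, hc]
  | succ n ih =>
    intro l acc c hc
    cases l with
    | nil => simp [PySem.Chars.replace.go, hc]
    | cons h t =>
      simp only [PySem.Chars.replace.go]
      split
      · exact ih _ _ _ (by simp [hc])
      · exact ih _ _ _ (by simp [hc])

-- if '#' ∈ new and the result of go has no '#', no replacement ever fired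
theorem pv_go_noHash (old new : List Char) (hn : '#' ∈ new) :
    ∀ (fuel : Nat) (l acc : List Char),
      '#' ∉ PySem.Chars.replace.go old new fuel l acc →
      PySem.Chars.replace.go old new fuel l acc = acc.reverse ++ l := by
  intro fuel
  induction fuel with
  | zero => intro l acc _; simp [PySem.Chars.replace.go]
  | succ n ih =>
    intro l acc hno
    cases l with
    | nil => simp [PySem.Chars.replace.go]
    | cons h t =>
      simp only [PySem.Chars.replace.go] at hno ⊢
      split at hno
      · rename_i hp
        rw [if_pos hp]
        exact absurd (pv_go_mem_acc old new n _ _ '#' (by simp [hn])) hno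
      · rename_i hp
        rw [if_neg hp, ih _ _ hno]
        simp

theorem pv_replace_noHash (s old new : List Char) (hold : old ≠ []) (hn : '#' ∈ new)
    (h : '#' ∉ PySem.Chars.replace s old new) : PySem.Chars.replace s old new = s := by
  unfold PySem.Chars.replace at h ⊢
  rw [if_neg (by simpa [List.isEmpty_iff] using hold)] at h ⊢
  rw [pv_go_noHash old new hn _ _ _ h]; simp

theorem pv_substFold_noHash :
    ∀ (ps : List (Int × String)) (l : String),
      '#' ∉ (ps.foldl (fun l jp => PySem.Str.replace l ("&" ++ jp.2) ("#ARG" ++ PySem.Int.toStr jp.1)) l).toList →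
      ps.foldl (fun l jp => PySem.Str.replace l ("&" ++ jp.2) ("#ARG" ++ PySem.Int.toStr jp.1)) l = l := by
  intro ps
  induction ps with
  | nil => intro l _; rfl
  | cons jp t ih =>
    intro l hno
    simp only [List.foldl_cons] at hno ⊢
    have h1 := ih _ hno
    rw [h1] at hno ⊢
    rw [PySem.Str.toList_replace] at hno
    have h2 : PySem.Chars.replace l.toList ("&" ++ jp.2).toList ("#ARG" ++ PySem.Int.toStr jp.1).toList = l.toList :=
      pv_replace_noHash _ _ _ (by simp [String.toList_append]) (by simp [String.toList_append]) hno
    simp only [PySem.Str.replace, h2]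
    simp

theorem pv_subst_ne_mend (pnames : List String) (l : String)
    (h : PySem.Str.strip l ≠ "MEND") : pvA_subst pnames l ≠ "MEND" := by
  intro he
  have hno : '#' ∉ (pvA_subst pnames l).toList := by rw [he]; decide
  have := pv_substFold_noHash (PySem.List.enumerate pnames 0) l (by simpa [pvA_subst] using hno)
  have hl : l = "MEND" := by rw [← this, ← pvA_subst]; exact he ▸ rfl
  exact h (by rw [hl]; decide)

-- the segment of the MDT from an index up to (excluding) the first "MEND" sentinel
def pvTakeMend : List String → Option (List String)
  | [] => none
  | x :: r => if x = "MEND" then some [] else (pvTakeMend r).map (x :: ·)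

theorem pvTakeMend_append_of_some (l ext b : List String) (h : pvTakeMend l = some b) :
    pvTakeMend (l ++ ext) = some b := by
  induction l generalizing b with
  | nil => simp [pvTakeMend] at h
  | cons x r ih =>
    simp only [pvTakeMend, List.cons_append] at h ⊢
    split at h
    · rename_i hx
      rw [if_pos hx]
      simpa using h
    · rename_i hx
      rw [if_neg hx]
      cases hr : pvTakeMend r with
      | none => rw [hr] at h; simp at h
      | some b' =>
        rw [hr] at h; simp at h
        rw [ih _ hr]; simpa using h

theorem pvTakeMend_body (body : List String) (h : ∀ x ∈ body, x ≠ "MEND") :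
    pvTakeMend (body ++ ["MEND"]) = some body := by
  induction body with
  | nil => simp [pvTakeMend]
  | cons x r ih =>
    simp only [List.cons_append, pvTakeMend]
    rw [if_neg (h x (by simp))]
    rw [ih (fun y hy => h y (by simp [hy]))]
    rfl

theorem pvA_expand_of_takeMend (mapping : PySem.Dict String String) :
    ∀ (seg body : List String), pvTakeMend seg = some body →
      pvA_expand mapping seg =
        some (body.map (fun t => mapping.items.foldl (fun temp kv => PySem.Str.replace temp kv.1 kv.2) t)) := by
  intro seg
  induction seg with
  | nil => intro body h; simp [pvTakeMend] at h
  | cons t r ih =>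
    intro body h
    simp only [pvTakeMend] at h
    simp only [pvA_expand]
    split at h
    · rename_i ht
      simp only [Option.some.injEq] at h
      rw [if_pos ht, ← h]; rfl
    · rename_i ht
      rw [if_neg ht]
      cases hr : pvTakeMend r with
      | none => rw [hr] at h; simp at h
      | some b' =>
        rw [hr] at h; simp only [Option.map_some, Option.some.injEq] at h
        rw [ih _ hr, ← h]; rfl

-- A's body collector, expressed through B's raw split: A appends the substituted raw slice
theorem pvA_body_corr (pnames : List String) :
    ∀ (rest mdt : List String) (k : Int),
      pvA_body pnames rest mdt k =
        (pvB_split rest).map (fun p => (mdt ++ p.1.map (pvA_subst pnames), k + (p.1.length : Int), p.2)) := by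
  intro rest
  induction rest with
  | nil => intro mdt k; simp [pvA_body, pvB_split]
  | cons l r ih =>
    intro mdt k
    simp only [pvA_body, pvB_split]
    split
    · simp
    · rw [ih]
      cases pvB_split r with
      | none => simp
      | some p =>
        simp [List.append_assoc]
        omega

-- every raw line in the split's body strips to something other than "MEND"
theorem pvB_split_mendfree :
    ∀ (rest body r : List String), pvB_split rest = some (body, r) →
      ∀ x ∈ body, PySem.Str.strip x ≠ "MEND" := by
  intro rest
  induction rest with
  | nil => intro body r h; simp [pvB_split] at h
  | cons l t ih =>
    intro body r h
    simp only [pvB_split] at h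
    split at h
    · simp only [Option.some.injEq, Prod.mk.injEq] at h
      rw [← h.1]; intro x hx; simp at hx
    · rename_i hl
      cases ht : pvB_split t with
      | none => rw [ht] at h; simp at h
      | some p =>
        rw [ht] at h
        simp only [Option.map_some, Option.some.injEq, Prod.mk.injEq] at h
        rw [← h.1]
        intro x hx
        rcases List.mem_cons.mp hx with hx | hx
        · exact hx ▸ hl
        · exact ih p.1 p.2 (by rw [ht]) x hx

-- the invariant tying A's (mnt, mdt) to B's macros dict
def pvInv (mnt : PySem.Dict String Int) (mdt : List String)
    (macros : PySem.Dict String (List String × List String)) : Prop :=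
  ∀ name : String,
    (mnt.get? name = none ∧ macros.get? name = none) ∨
    ∃ (i : Int) (pnames raw : List String), mnt.get? name = some i ∧
      macros.get? name = some (pnames, raw) ∧ 0 ≤ i ∧
      pvTakeMend (mdt.drop i.toNat) = some (raw.map (pvA_subst pnames))

theorem pvInv_empty : pvInv PySem.Dict.empty [] PySem.Dict.empty := by
  intro name; left; simp [PySem.Dict.get?_empty]

theorem pvInv_contains (mnt : PySem.Dict String Int) (mdt : List String)
    (macros : PySem.Dict String (List String × List String)) (h : pvInv mnt mdt macros) (tok : String) :
    mnt.contains tok = macros.contains tok := by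
  rcases h tok with ⟨h1, h2⟩ | ⟨i, pn, raw, h1, h2, _, _⟩ <;>
    simp [PySem.Dict.contains_eq_isSome_get?, h1, h2]

theorem pvInv_insert (mnt : PySem.Dict String Int) (mdt : List String)
    (macros : PySem.Dict String (List String × List String)) (name : String)
    (pnames raw : List String)
    (hinv : pvInv mnt mdt macros) (hb : ∀ x ∈ raw.map (pvA_subst pnames), x ≠ "MEND") :
    pvInv (mnt.insert name (mdt.length : Int)) (mdt ++ raw.map (pvA_subst pnames) ++ ["MEND"])
      (macros.insert name (pnames, raw)) := by
  intro name'
  by_cases h : name' = name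
  · right
    refine ⟨(mdt.length : Int), pnames, raw, ?_, ?_, by positivity, ?_⟩
    · rw [h, PySem.Dict.get?_insert_self]
    · rw [h, PySem.Dict.get?_insert_self]
    · rw [List.append_assoc, Int.toNat_natCast, List.drop_left]
      exact pvTakeMend_body _ hb
  · rw [PySem.Dict.get?_insert_of_ne (hne := h), PySem.Dict.get?_insert_of_ne (hne := h)]
    rcases hinv name' with hl | ⟨i, pn, rw', h1, h2, h3, h4⟩
    · left; exact hl
    · right
      refine ⟨i, pn, rw', h1, h2, h3, ?_⟩
      have hlt : i.toNat < mdt.length := by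
        by_contra hge
        rw [List.drop_eq_nil_of_le (by omega)] at h4
        simp [pvTakeMend] at h4
      rw [List.append_assoc, List.drop_append_of_le_length (by omega)]
      exact pvTakeMend_append_of_some _ _ _ h4

-- the two argument-mapping dicts coincide
theorem pv_mapping_eq (args : List String) :
    (PySem.List.pyRange 0 (args.length : Int) 1).foldl
      (fun d j => d.insert ("#ARG" ++ PySem.Int.toStr j) (PySem.List.pyGetD args j ""))
      PySem.Dict.empty
    = (PySem.List.enumerate args 0).foldl
      (fun d ja => d.insert ("#ARG" ++ PySem.Int.toStr ja.1) ja.2) PySem.Dict.empty := by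
  rw [PySem.List.enumerate_eq_map_pyRange (d := ""), List.foldl_map]
  rfl

theorem pv_loop_eq :
    ∀ (n : Nat) (lines : List String), lines.length ≤ n →
    ∀ (mnt : PySem.Dict String Int) (mdt : List String) (k : Int)
      (ala : PySem.Dict String (List String))
      (macros : PySem.Dict String (List String × List String))
      (expanded : List String),
      k = (mdt.length : Int) → pvInv mnt mdt macros →
      pvA_loop lines mnt mdt k ala expanded = pvB_loop lines macros expanded := by
  intro n
  induction n with
  | zero =>
    intro lines hlen _ _ _ _ _ _ _ _
    have : lines = [] := List.eq_nil_of_length_eq_zero (by omega)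
    subst this; simp [pvA_loop, pvB_loop]
  | succ n ih =>
    intro lines hlen mnt mdt k ala macros expanded hk hinv
    cases lines with
    | nil => simp [pvA_loop, pvB_loop]
    | cons l rest =>
      by_cases hm : PySem.Str.strip l = "MACRO"
      · cases rest with
        | nil => simp [pvA_loop, pvB_loop, hm]
        | cons hdr rest2 =>
          cases hsp : PySem.Str.split₀ hdr with
          | nil => simp [pvA_loop, pvB_loop, hm, hsp]
          | cons name params =>
            have hcorr := pvA_body_corr (params.map (fun p => PySem.Str.replace p "&" "")) rest2 mdt k
            simp only [pvA_loop, pvB_loop, hm, hsp]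
            simp only [if_pos]
            split
            · rename_i ha
              split
              · rfl
              · rename_i body rest' hb
                rw [ha, hb] at hcorr
                simp at hcorr
            · rename_i mdt2 k2 rest' ha
              split
              · rename_i hb
                rw [ha, hb] at hcorr
                simp at hcorr
              · rename_i body rest'' hb
                rw [ha, hb] at hcorr
                simp only [Option.map_some, Option.some.injEq, Prod.mk.injEq] at hcorr
                obtain ⟨h1, h2, h3⟩ := hcorr
                subst h1; subst h2; subst h3
                have hrl := pvB_split_rest_le _ _ _ hb
                apply ih
                · simp only [List.length_cons] at hlen; omega
                · simp only [List.length_append, List.length_cons, List.length_nil, List.length_map]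
                  push_cast; omega
                · have hmf : ∀ x ∈ body.map (pvA_subst (params.map (fun p => PySem.Str.replace p "&" ""))), x ≠ "MEND" := by
                    intro x hx
                    rcases List.mem_map.mp hx with ⟨y, hy, hxy⟩
                    exact hxy ▸ pv_subst_ne_mend _ y (pvB_split_mendfree _ _ _ hb y hy)
                  have := pvInv_insert mnt mdt macros name _ body hinv hmf
                  rw [hk]
                  exact this
      · cases hsp : PySem.Str.split₀ l with
        | nil =>
          rw [pvA_loop.eq_def, pvB_loop.eq_def]
          simp only [hm, hsp]
          exact ih rest (by simp only [List.length_cons] at hlen; omega) _ _ _ _ _ _ hk hinv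
        | cons tok args =>
          have hcont := pvInv_contains mnt mdt macros hinv tok
          by_cases hc : macros.contains tok = true
          · rcases hinv tok with ⟨h1, h2⟩ | ⟨i, pn, raw, h1, h2, h3, h4⟩
            · rw [PySem.Dict.contains_eq_isSome_get?, h2] at hc; simp at hc
            · have hgetd : mnt.getD tok 0 = i := by
                rw [PySem.Dict.getD_eq_get?_getD, h1]; rfl
              have hexp := pvA_expand_of_takeMend
                ((PySem.List.enumerate args 0).foldl
                  (fun d ja => d.insert ("#ARG" ++ PySem.Int.toStr ja.1) ja.2)
                  PySem.Dict.empty) _ _ h4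
              have hgetdb : macros.getD tok ([], []) = (pn, raw) := by
                rw [PySem.Dict.getD_eq_get?_getD, h2]; rfl
              rw [pvA_loop.eq_def, pvB_loop.eq_def]
              simp only [hm, hsp, hcont ▸ hc, hc, pv_mapping_eq, hgetd, hexp, hgetdb,
                if_true, if_false]
              rw [List.map_map]
              exact ih rest (by simp only [List.length_cons] at hlen; omega) _ _ _ _ _ _ hk hinv
          · have hc' : mnt.contains tok = false := by rw [hcont]; simpa using hc
            rw [pvA_loop.eq_def, pvB_loop.eq_def]
            simp only [hm, hsp, hc',
              (by simpa using hc : macros.contains tok = false), Bool.false_eq_true, if_false]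
            exact ih rest (by simp only [List.length_cons] at hlen; omega) _ _ _ _ _ _ hk hinv

-- ===== VERDICT (by name: the statement is the Claim_ definition above) =====
theorem identify_and_expand_macros_spec : Claim_equal_identify_and_expand_macros := by
  intro lines _ _
  unfold Spec_identify_and_expand_macros identify_and_expand_macros identify_and_expand_macros_alt
  rw [pv_loop_eq lines.length lines le_rfl _ _ _ _ _ _ (by simp) pvInv_empty]
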